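-- pv_equiv track=rewrite | github.com/kkuntner/advent-of-code-2024 | 9/nine.py | nextBlank
-- ===== SOURCE A (Python) =====
-- BLANK = -1
--
-- def nextBlank(disk, searchAt, last, size):
--     s = 0
--     for i in range(searchAt, last):
--         if (disk[i] == BLANK):
--             s += 1
--             if s == size:
--                 return i - size + 1
--         else:
--             s = 0
--
--     return -1
-- ===== SOURCE B (Python) =====
-- BLANK = -1
--
-- def nextBlank(disk, searchAt, last, size):
--     # run-based scan: return the start of the first maximal blank run of length >= size
--     if size <= 0:
--         return -1
--     i = searchAt
--     while i < last:
--         if disk[i] != BLANK: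
--             i += 1
--         else:
--             j = i + 1
--             while j < last and disk[j] == BLANK:
--                 j += 1
--             if j - i >= size:
--                 return i
--             i = j
--     return -1
-- ===== Notes on version B (the rewrite author's own statement) =====
-- stated objective: alternative
-- what changed: Replaces A's per-index running blank counter with a two-level scan over maximal blank runs: an inner loop finds the end of each blank run and the run's start is returned when its length reaches size.
-- outside the precondition, e.g. on nextBlank([-1], 0, 5, 1): A returns 0, B raises IndexError; on nextBlank([0, -1], 1, 3, 1): A returns 1, B raises IndexError
import Mathlib
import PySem

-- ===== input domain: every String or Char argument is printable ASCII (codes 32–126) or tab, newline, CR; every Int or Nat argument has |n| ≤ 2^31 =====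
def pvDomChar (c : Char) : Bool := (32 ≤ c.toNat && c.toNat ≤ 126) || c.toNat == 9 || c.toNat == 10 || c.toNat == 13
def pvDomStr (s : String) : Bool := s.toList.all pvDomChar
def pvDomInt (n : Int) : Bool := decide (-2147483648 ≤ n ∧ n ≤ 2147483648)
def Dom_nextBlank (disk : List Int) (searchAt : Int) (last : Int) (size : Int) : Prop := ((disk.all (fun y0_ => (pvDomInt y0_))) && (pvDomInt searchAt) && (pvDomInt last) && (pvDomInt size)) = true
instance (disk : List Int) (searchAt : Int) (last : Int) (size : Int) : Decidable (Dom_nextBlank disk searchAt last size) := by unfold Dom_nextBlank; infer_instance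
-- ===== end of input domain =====

-- B replaces A's per-index running blank counter with a scan over maximal blank runs (alternative decomposition, same cost).


-- ===== PORT A =====
-- the for-loop over range(searchAt, last) with running counter s and early return
def nextBlankGo (disk : List Int) (size : Int) : List Int → Int → Int
  | [], _ => -1
  | i :: rest, s =>
    if PySem.List.pyGetD disk i 0 == -1 then
      if s + 1 == size then i - size + 1
      else nextBlankGo disk size rest (s + 1)
    else nextBlankGo disk size rest 0

def nextBlank (disk : List Int) (searchAt : Int) (last : Int) (size : Int) : Int :=
  nextBlankGo disk size (PySem.List.pyRange searchAt last 1) 0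

-- ===== PORT B =====
-- inner while loop: advance j while j < last and disk[j] == BLANK
def altRunEnd (disk : List Int) (last : Int) (j : Int) : Int :=
  if h : j < last ∧ PySem.List.pyGetD disk j 0 == -1 then altRunEnd disk last (j + 1) else j
termination_by (last - j).toNat
decreasing_by omega

theorem altRunEnd_ge (disk : List Int) (last : Int) (j : Int) : j ≤ altRunEnd disk last j := by
  unfold altRunEnd
  split
  · have := altRunEnd_ge disk last (j + 1); omega
  · omega
termination_by (last - j).toNat
decreasing_by omega

-- outer while loop over i
def altGo (disk : List Int) (last : Int) (size : Int) (i : Int) : Int :=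
  if hi : i < last then
    if PySem.List.pyGetD disk i 0 ≠ -1 then altGo disk last size (i + 1)
    else
      let j := altRunEnd disk last (i + 1)
      if size ≤ j - i then i
      else altGo disk last size j
  else -1
termination_by (last - i).toNat
decreasing_by
  · omega
  · have := altRunEnd_ge disk last (i + 1); omega

def nextBlank_alt (disk : List Int) (searchAt : Int) (last : Int) (size : Int) : Int :=
  if size ≤ 0 then -1 else altGo disk last size searchAt

-- ===== PRECONDITION & SPEC =====
-- Pre_ excludes index ranges [searchAt, last) that leave Python's valid (negative-wrap) index range of
-- disk, where A raises IndexError unless it happens to return early on a blank run found before the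
-- first out-of-range index (see cites for two such excluded inputs on which A still returns).
def Pre_nextBlank (disk : List Int) (searchAt : Int) (last : Int) (size : Int) : Prop :=
  searchAt ≥ last ∨ (-(disk.length : Int) ≤ searchAt ∧ last ≤ (disk.length : Int))
instance (disk : List Int) (searchAt : Int) (last : Int) (size : Int) : Decidable (Pre_nextBlank disk searchAt last size) := by unfold Pre_nextBlank; infer_instance

def pvWitness_nextBlank : List Int × Int × Int × Int := ([0, -1, -1, 2], 0, 4, 2)

def Spec_nextBlank (disk : List Int) (searchAt : Int) (last : Int) (size : Int) (out : Int) : Prop := out = nextBlank_alt disk searchAt last size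
instance (disk : List Int) (searchAt : Int) (last : Int) (size : Int) (out : Int) : Decidable (Spec_nextBlank disk searchAt last size out) := by unfold Spec_nextBlank; infer_instance

-- ===== CLAIM (what is proved, stated in full; the proofs are below) =====
def Claim_equal_nextBlank : Prop := ∀ (disk : List Int) (searchAt : Int) (last : Int) (size : Int), Dom_nextBlank disk searchAt last size → Pre_nextBlank disk searchAt last size → Spec_nextBlank disk searchAt last size (nextBlank disk searchAt last size)

-- ===== LEMMAS AND PROOFS =====

-- A with a non-positive size never fires the counter test
theorem go_of_size_nonpos (disk : List Int) (size : Int) (hsz : size ≤ 0) :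
    ∀ (l : List Int) (s : Int), 0 ≤ s → nextBlankGo disk size l s = -1 := by
  intro l
  induction l with
  | nil => intro s _; rfl
  | cons i rest ih =>
    intro s hs
    unfold nextBlankGo
    split
    · have h1 : (s + 1 == size) = false := by simp; omega
      rw [h1]; simp only [Bool.false_eq_true, if_false]
      exact ih (s + 1) (by omega)
    · exact ih 0 le_rfl

-- unfolding A's loop one range element at a time
theorem go_cons (disk : List Int) (size a last s : Int) (h : a < last) :
    nextBlankGo disk size (PySem.List.pyRange a last 1) s =
      (if PySem.List.pyGetD disk a 0 == -1 then
        if s + 1 == size then a - size + 1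
        else nextBlankGo disk size (PySem.List.pyRange (a + 1) last 1) (s + 1)
      else nextBlankGo disk size (PySem.List.pyRange (a + 1) last 1) 0) := by
  rw [PySem.List.pyRange_one_cons h]
  rfl

theorem go_nil (disk : List Int) (size a last s : Int) (h : last ≤ a) :
    nextBlankGo disk size (PySem.List.pyRange a last 1) s = -1 := by
  rw [PySem.List.pyRange_one_eq_nil h]
  rfl

theorem altRunEnd_blank (disk : List Int) (last j : Int) (h1 : j < last)
    (h2 : PySem.List.pyGetD disk j 0 = -1) :
    altRunEnd disk last j = altRunEnd disk last (j + 1) := by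
  rw [altRunEnd]
  simp [h1, h2]

theorem altRunEnd_stop (disk : List Int) (last j : Int)
    (h : ¬ (j < last ∧ PySem.List.pyGetD disk j 0 = -1)) :
    altRunEnd disk last j = j := by
  rw [altRunEnd]
  simp only [beq_iff_eq]
  rw [dif_neg h]

-- Core agreement, by strong induction on the remaining window length.
-- part 1: A's loop with counter 0 equals B's outer loop;
-- part 2: inside a blank run with counter s (1 ≤ s < size), A's loop agrees with B's run decision.
theorem main_ind (disk : List Int) (last size : Int) (hsz : 1 ≤ size) :
    ∀ (n : ℕ) (a : Int), (last - a).toNat = n →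
      (nextBlankGo disk size (PySem.List.pyRange a last 1) 0 = altGo disk last size a ∧
       ∀ s : Int, 1 ≤ s → s < size →
         nextBlankGo disk size (PySem.List.pyRange a last 1) s =
           (if size ≤ s + (altRunEnd disk last a - a) then a - s
            else altGo disk last size (altRunEnd disk last a))) := by
  intro n
  induction n using Nat.strong_induction_on with
  | _ n ih =>
    intro a hn
    by_cases hal : a < last
    · by_cases hblank : PySem.List.pyGetD disk a 0 = -1
      · -- disk[a] is blank
        have hrun : altRunEnd disk last a = altRunEnd disk last (a + 1) :=
          altRunEnd_blank disk last a hal hblank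
        have hre1 : a + 1 ≤ altRunEnd disk last (a + 1) := altRunEnd_ge disk last (a + 1)
        have ihnext := ih (last - (a + 1)).toNat (by omega) (a + 1) rfl
        constructor
        · -- counter 0 case
          rw [go_cons disk size a last 0 hal, altGo, dif_pos hal]
          simp only [hblank, beq_self_eq_true, if_true, ne_eq, not_true_eq_false, if_false,
            zero_add, beq_iff_eq]
          split_ifs with hA hB hB
          · omega
          · omega
          · rw [ihnext.2 1 le_rfl (by omega), if_pos (by omega)]; omega
          · rw [ihnext.2 1 le_rfl (by omega), if_neg (by omega)]
        · -- counter s case, inside a blank run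
          intro s hs1 hs2
          rw [go_cons disk size a last s hal]
          simp only [hblank, beq_self_eq_true, if_true, beq_iff_eq, hrun]
          split_ifs with hA hB hB
          · omega
          · omega
          · rw [ihnext.2 (s + 1) (by omega) (by omega), if_pos (by omega)]; omega
          · rw [ihnext.2 (s + 1) (by omega) (by omega), if_neg (by omega)]
      · -- disk[a] is not blank: run ends at a
        have hstop : altRunEnd disk last a = a :=
          altRunEnd_stop disk last a (by intro h; exact hblank h.2)
        have ihnext := ih (last - (a + 1)).toNat (by omega) (a + 1) rfl
        constructor
        · rw [go_cons disk size a last 0 hal]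
          rw [if_neg (by simpa using hblank)]
          rw [altGo, dif_pos hal, if_pos (by simpa using hblank)]
          exact ihnext.1
        · intro s hs1 hs2
          rw [go_cons disk size a last s hal]
          rw [if_neg (by simpa using hblank)]
          rw [hstop, if_neg (by omega)]
          rw [altGo, dif_pos hal, if_pos (by simpa using hblank)]
          exact ihnext.1
    · -- a ≥ last: both loops are done
      have hstop : altRunEnd disk last a = a :=
        altRunEnd_stop disk last a (by intro h; omega)
      constructor
      · rw [go_nil disk size a last 0 (by omega)]
        rw [altGo, dif_neg hal]
      · intro s hs1 hs2
        rw [go_nil disk size a last s (by omega), hstop]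
        rw [if_neg (by omega), altGo, dif_neg hal]

-- ===== VERDICT (by name: the statement is the Claim_ definition above) =====
theorem nextBlank_spec : Claim_equal_nextBlank := by
  intro disk searchAt last size _ _
  unfold Spec_nextBlank nextBlank nextBlank_alt
  by_cases hsz : size ≤ 0
  · rw [if_pos hsz]
    exact go_of_size_nonpos disk size hsz _ 0 le_rfl
  · rw [if_neg hsz]
    exact (main_ind disk last size (by omega) (last - searchAt).toNat searchAt rfl).1
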